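-- pv_equiv track=rewrite | github.com/Minerstove/Python | cs11/Prac10/Prac10c.py | gas_stations
-- ===== SOURCE A (Python) =====
-- def gas_stations(stations, points):
--     if not stations:
--         return [None] * len(points)
--
--     result = []
--     sorted_dict = sorted(stations)
--
--     # BINARY SEARCH
--     for point in points:
--         left, right = 0, len(sorted_dict) - 1
--         ans = None
--         while left <= right:
--             mid = (left + right) // 2
--             if point >= sorted_dict[mid]:
--                 left = mid + 1
--             else:
--                 ans = sorted_dict[mid]
--                 right = mid - 1
--         result.append(stations[ans] if ans is not None else None)
--
--     return result
-- ===== SOURCE B (Python) =====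
-- def gas_stations(stations, points):
--     if not stations:
--         return [None] * len(points)
--     out = []
--     for p in points:
--         bigger = [k for k in stations if k > p]
--         out.append(stations[min(bigger)] if bigger else None)
--     return out
-- ===== Notes on version B (the rewrite author's own statement) =====
-- stated objective: alternative
-- what changed: A sorts the station keys once and runs a hand-written binary search per point; B does no sorting and no searching: for each point it filters the keys strictly greater than the point and takes min() of them, then does the same stations[ans] lookup.
import Mathlib
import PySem

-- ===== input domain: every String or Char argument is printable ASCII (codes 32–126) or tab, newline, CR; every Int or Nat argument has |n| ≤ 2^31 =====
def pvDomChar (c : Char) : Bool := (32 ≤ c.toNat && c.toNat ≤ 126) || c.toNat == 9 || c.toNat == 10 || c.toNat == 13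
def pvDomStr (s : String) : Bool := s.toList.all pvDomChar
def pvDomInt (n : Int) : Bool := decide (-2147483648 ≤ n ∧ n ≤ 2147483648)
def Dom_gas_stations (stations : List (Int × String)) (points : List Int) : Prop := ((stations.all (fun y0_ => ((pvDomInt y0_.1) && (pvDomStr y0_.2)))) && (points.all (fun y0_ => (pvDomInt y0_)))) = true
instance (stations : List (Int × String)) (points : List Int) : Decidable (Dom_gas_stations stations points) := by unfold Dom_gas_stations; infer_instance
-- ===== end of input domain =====

-- B replaces A's sort-once-then-binary-search-per-point with no sort at all: per point it takes
-- min() of the keys strictly greater than the point (objective: alternative, not faster).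

-- ===== PORT A =====
-- the 'while left <= right' binary-search loop of A, state (left, right, ans)
def pvLoopA (keys : List Int) (point : Int) (left right : Int) (ans : Option Int) : Option Int :=
  if h : left ≤ right then
    let mid := PySem.Int.floordiv (left + right) 2
    if point ≥ PySem.List.pyGetD keys mid 0 then
      pvLoopA keys point (mid + 1) right ans
    else
      pvLoopA keys point left (mid - 1) (some (PySem.List.pyGetD keys mid 0))
  else ans
termination_by (right + 1 - left).toNat
decreasing_by
  · have := PySem.Int.floordiv_two_mid_bounds h; omega
  · have := PySem.Int.floordiv_two_mid_bounds h; omega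

def gas_stations (stations : List (Int × String)) (points : List Int) : List (Option String) :=
  if stations = [] then List.replicate points.length none
  else
    let d := PySem.Dict.ofList stations
    let sorted_dict := PySem.List.sorted d.keys (fun x => x) false
    -- stations[ans]: ans is always a key of the dict, so the lookup never raises; getD is exact here
    points.foldl (fun result point =>
      result ++ [match pvLoopA sorted_dict point 0 ((sorted_dict.length : Int) - 1) none with
                 | some k => some (d.getD k "")
                 | none => none]) []

-- ===== PORT B =====
def gas_stations_alt (stations : List (Int × String)) (points : List Int) : List (Option String) :=
  if stations = [] then List.replicate points.length none
  else
    let d := PySem.Dict.ofList stations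
    points.foldl (fun out p =>
      let bigger := d.keys.filter (fun k => decide (p < k))
      out ++ [match PySem.List.min? bigger (fun x => x) with
              | some m => some (d.getD m "")
              | none => none]) []

-- ===== PRECONDITION & SPEC =====
def Spec_gas_stations (stations : List (Int × String)) (points : List Int) (out : List (Option String)) : Prop := out = gas_stations_alt stations points
instance (stations : List (Int × String)) (points : List Int) (out : List (Option String)) : Decidable (Spec_gas_stations stations points out) := by unfold Spec_gas_stations; infer_instance

-- ===== CLAIM (what is proved, stated in full; the proofs are below) =====
def Claim_equal_gas_stations : Prop := ∀ (stations : List (Int × String)) (points : List Int), Dom_gas_stations stations points → Spec_gas_stations stations points (gas_stations stations points)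

-- ===== LEMMAS AND PROOFS =====

-- window [a, b) of a list, as Nat indices
def pvWin (l : List Int) (a b : Nat) : List Int := (l.drop a).take (b - a)

theorem pvWin_split (l : List Int) (a b c : Nat) (hab : a ≤ b) (hbc : b ≤ c) :
    pvWin l a c = pvWin l a b ++ pvWin l b c := by
  unfold pvWin
  have h1 : c - a = (b - a) + (c - b) := by omega
  rw [h1, List.take_add, List.drop_drop]
  have h2 : a + (b - a) = b := by omega
  rw [h2]

theorem pvWin_one (l : List Int) (m : Nat) (hm : m < l.length) :
    pvWin l m (m + 1) = [l[m]] := by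
  unfold pvWin
  rw [List.drop_eq_getElem_cons hm]
  have h1 : m + 1 - m = 1 := by omega
  rw [h1]
  rfl

theorem pvWin_mem (l : List Int) (a b : Nat) (x : Int) (hx : x ∈ pvWin l a b) :
    ∃ i : Nat, a ≤ i ∧ i < b ∧ ∃ hi : i < l.length, x = l[i] := by
  unfold pvWin at hx
  obtain ⟨i, hi, hget⟩ := List.getElem_of_mem hx
  have hlen1 : (l.drop a).length = l.length - a := List.length_drop ..
  have hlt2 : i < ((l.drop a).take (b - a)).length := hi
  have hlt3 : i < min (b - a) (l.length - a) := by
    simpa [List.length_take, hlen1] using hlt2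
  have hlen : a + i < l.length := by omega
  refine ⟨a + i, by omega, by omega, hlen, ?_⟩
  rw [← hget, List.getElem_take, List.getElem_drop]

-- a Pairwise-(≤) list is index-monotone
theorem pvMono (l : List Int) (hs : l.Pairwise (· ≤ ·)) (i j : Nat) (hij : i ≤ j)
    (hj : j < l.length) : l[i]'(by omega) ≤ l[j] := by
  rcases Nat.lt_or_ge i j with h | h
  · exact (List.pairwise_iff_getElem.mp hs) i j (by omega) hj h
  · have : i = j := by omega
    subst this; exact le_refl _

-- A's binary-search loop computes find? over the current window, with 'ans' as fallback
theorem pvLoopA_eq_find (keys : List Int) (point : Int)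
    (hs : keys.Pairwise (· ≤ ·)) :
    ∀ (left right : Int) (ans : Option Int), 0 ≤ left → right < (keys.length : Int) →
      pvLoopA keys point left right ans =
        ((pvWin keys left.toNat (right + 1).toNat).find? (fun k => decide (point < k))).or ans := by
  suffices H : ∀ (n : Nat) (left right : Int) (ans : Option Int),
      (right + 1 - left).toNat = n → 0 ≤ left → right < (keys.length : Int) →
      pvLoopA keys point left right ans =
        ((pvWin keys left.toNat (right + 1).toNat).find? (fun k => decide (point < k))).or ans by
    intro left right ans h0 hr
    exact H _ left right ans rfl h0 hr
  intro n
  induction n using Nat.strong_induction_on with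
  | _ n ih =>
    intro left right ans hn h0 hr
    rw [pvLoopA]
    by_cases h : left ≤ right
    · simp only [h, dif_pos]
      have hmid := PySem.Int.floordiv_two_mid_bounds h
      set mid := PySem.Int.floordiv (left + right) 2 with hmiddef
      have hmid0 : 0 ≤ mid := by omega
      have hmidlen : mid < (keys.length : Int) := by omega
      have hget : PySem.List.pyGetD keys mid 0 = keys[mid.toNat]'(by omega) :=
        PySem.List.pyGetD_eq_getElem keys 0 hmid0 hmidlen
      have hLM : left.toNat ≤ mid.toNat := by omega
      have hM1 : (mid + 1).toNat = mid.toNat + 1 := by omega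
      by_cases hge : point ≥ PySem.List.pyGetD keys mid 0
      · simp only [hge, if_pos]
        rw [ih (right + 1 - (mid + 1)).toNat (by omega) (mid + 1) right ans rfl (by omega) hr]
        rw [pvWin_split keys left.toNat (mid + 1).toNat (right + 1).toNat (by omega) (by omega),
            List.find?_append]
        have hnone : (pvWin keys left.toNat (mid + 1).toNat).find? (fun k => decide (point < k)) = none := by
          rw [List.find?_eq_none]
          intro x hx
          obtain ⟨i, _, hib, hilen, hxe⟩ := pvWin_mem keys left.toNat (mid + 1).toNat x hx
          have hix : keys[i] ≤ keys[mid.toNat]'(by omega) :=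
            pvMono keys hs i mid.toNat (by omega) (by omega)
          simp only [decide_eq_true_eq]
          rw [hget] at hge
          omega
        rw [hnone, Option.none_or]
      · simp only [hge]
        rw [ih (mid - 1 + 1 - left).toNat (by omega) left (mid - 1) _ rfl h0 (by omega)]
        have hM0 : (mid - 1 + 1).toNat = mid.toNat := by omega
        rw [hM0]
        rw [pvWin_split keys left.toNat mid.toNat (right + 1).toNat hLM (by omega),
            pvWin_split keys mid.toNat (mid.toNat + 1) (right + 1).toNat (by omega) (by omega),
            pvWin_one keys mid.toNat (by omega)]
        have hpt : point < keys[mid.toNat]'(by omega) := by rw [hget] at hge; omega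
        rw [List.find?_append, List.find?_append]
        simp only [List.find?_cons, hpt, decide_true]
        rw [← Option.or_assoc, hget]
        simp
    · simp only [h]
      have hwin : pvWin keys left.toNat (right + 1).toNat = [] := by
        unfold pvWin
        have : (right + 1).toNat - left.toNat = 0 := by omega
        rw [this, List.take_zero]
      rw [hwin]
      rfl

-- on a Pairwise-(≤) list, min? of the filtered list is find?
theorem pvMin_eq_find (l : List Int) (point : Int) (hs : l.Pairwise (· ≤ ·)) :
    PySem.List.min? (l.filter (fun k => decide (point < k))) (fun x => x) =
      l.find? (fun k => decide (point < k)) := by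
  induction l with
  | nil => rfl
  | cons x t ih =>
    have hx : ∀ y ∈ t, x ≤ y := (List.pairwise_cons.mp hs).1
    have ht : t.Pairwise (· ≤ ·) := (List.pairwise_cons.mp hs).2
    by_cases hp : point < x
    · simp only [List.filter_cons, List.find?_cons, hp, decide_true, if_pos]
      rw [PySem.List.min?_id_cons]
      have hle : (t.filter (fun k => decide (point < k))).foldl min x ≤ x :=
        (PySem.List.foldl_min_le _ x).1
      have hge : x ≤ (t.filter (fun k => decide (point < k))).foldl min x := by
        rcases PySem.List.foldl_min_mem (t.filter (fun k => decide (point < k))) x with h | h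
        · omega
        · exact hx _ (List.mem_of_mem_filter h)
      have : (t.filter (fun k => decide (point < k))).foldl min x = x := le_antisymm hle hge
      rw [this]
    · simp only [List.filter_cons, List.find?_cons, hp, decide_false]
      exact ih ht

-- min? with identity key only depends on the multiset of elements
theorem pvMin_perm (l₁ l₂ : List Int) (hp : l₁.Perm l₂) :
    PySem.List.min? l₁ (fun x => x) = PySem.List.min? l₂ (fun x => x) := by
  by_cases h1 : l₁ = []
  · have h2 : l₂ = [] := by
      subst h1; exact hp.symm.eq_nil
    rw [h1, h2]
  · have h2 : l₂ ≠ [] := fun h => h1 (by subst h; exact hp.eq_nil)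
    obtain ⟨m₁, hm₁⟩ := Option.ne_none_iff_exists'.mp
      (fun h => h1 ((PySem.List.min?_eq_none_iff l₁ (fun x : Int => x)).mp h))
    obtain ⟨m₂, hm₂⟩ := Option.ne_none_iff_exists'.mp
      (fun h => h2 ((PySem.List.min?_eq_none_iff l₂ (fun x : Int => x)).mp h))
    have e1 : m₁ ∈ l₁ := PySem.List.min?_mem hm₁
    have e2 : m₂ ∈ l₂ := PySem.List.min?_mem hm₂
    have le1 : m₁ ≤ m₂ := PySem.List.min?_isMin hm₁ m₂ (hp.mem_iff.mpr e2)
    have le2 : m₂ ≤ m₁ := PySem.List.min?_isMin hm₂ m₁ (hp.mem_iff.mp e1)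
    rw [hm₁, hm₂, le_antisymm le1 le2]

-- ===== VERDICT (by name: the statement is the Claim_ definition above) =====
theorem gas_stations_spec : Claim_equal_gas_stations := by
  intro stations points _dom
  unfold Spec_gas_stations gas_stations gas_stations_alt
  by_cases hst : stations = []
  · simp [hst]
  · simp only [hst, ite_false]
    set d := PySem.Dict.ofList stations with hd
    set skeys := PySem.List.sorted d.keys (fun x => x) false with hsk
    have hperm : skeys.Perm d.keys := PySem.List.sorted_perm d.keys _ false
    have hpair : skeys.Pairwise (· ≤ ·) := PySem.List.sorted_pairwise d.keys _
    rw [PySem.List.foldl_append_singleton_eq_map _ points [],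
        PySem.List.foldl_append_singleton_eq_map _ points []]
    simp only [List.nil_append]
    apply List.map_congr_left
    intro p _
    have hfind : pvLoopA skeys p 0 ((skeys.length : Int) - 1) none =
        skeys.find? (fun k => decide (p < k)) := by
      rw [pvLoopA_eq_find skeys p hpair 0 ((skeys.length : Int) - 1) none (le_refl 0) (by omega)]
      have : ((skeys.length : Int) - 1 + 1).toNat = skeys.length := by omega
      rw [this]
      unfold pvWin
      simp
    have hmin : PySem.List.min? (d.keys.filter (fun k => decide (p < k))) (fun x => x) =
        skeys.find? (fun k => decide (p < k)) := by
      rw [pvMin_perm _ _ ((hperm.filter _).symm), pvMin_eq_find skeys p hpair]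
    rw [hfind, hmin]
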